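-- pv_equiv track=rewrite | github.com/Lewxa2011/UnrealPacketAnalyzer | si.py | find_consistent_positions
-- ===== SOURCE A (Python) =====
-- def find_consistent_positions(responses):
--     byte_responses = [bytes.fromhex(r) for r in responses]
--
--     min_length = min(len(r) for r in byte_responses)
--
--     consistent_positions = []
--     for i in range(min_length):
--         values = set(r[i] for r in byte_responses)
--         if len(values) == 1:
--             consistent_positions.append(i)
--
--     return consistent_positions
-- ===== SOURCE B (Python) =====
-- def find_consistent_positions(responses):
--     byte_responses = [bytes.fromhex(r) for r in responses]
--
--     min_length = min(len(r) for r in byte_responses)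
--
--     ref = byte_responses[0]
--     candidates = list(range(min_length))
--     for r in byte_responses[1:]:
--         candidates = [i for i in candidates if r[i] == ref[i]]
--
--     return candidates
-- ===== Notes on version B (the rewrite author's own statement) =====
-- stated objective: alternative
-- what changed: B replaces A's position-major scan (build a set of the i-th bytes of all responses for every position) by response-major narrowing: start from all positions of range(min_length) and filter the candidate list against each further response, comparing with the first response as reference.
import Mathlib
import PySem

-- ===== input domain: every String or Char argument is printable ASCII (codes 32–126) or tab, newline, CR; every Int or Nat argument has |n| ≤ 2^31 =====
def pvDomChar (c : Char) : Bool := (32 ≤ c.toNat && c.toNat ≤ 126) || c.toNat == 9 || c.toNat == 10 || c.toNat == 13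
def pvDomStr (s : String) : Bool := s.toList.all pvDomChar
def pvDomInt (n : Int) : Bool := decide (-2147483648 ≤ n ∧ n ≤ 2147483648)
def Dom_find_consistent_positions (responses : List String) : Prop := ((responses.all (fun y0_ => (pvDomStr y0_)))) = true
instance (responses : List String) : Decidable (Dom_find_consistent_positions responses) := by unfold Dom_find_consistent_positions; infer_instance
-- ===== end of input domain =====

-- B narrows a candidate list of positions response-by-response instead of A's per-position
-- set construction; an alternative decomposition of the same cost (not claimed faster).


-- shared helper: bytes.fromhex (exact on the printable-ASCII + tab/newline/CR domain:
-- ASCII whitespace is skipped between byte pairs, each byte is two adjacent hex digits;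
-- none = ValueError)
def hexVal (c : Char) : Option Int :=
  if '0' ≤ c ∧ c ≤ '9' then some ((c.toNat : Int) - 48)
  else if 'a' ≤ c ∧ c ≤ 'f' then some ((c.toNat : Int) - 87)
  else if 'A' ≤ c ∧ c ≤ 'F' then some ((c.toNat : Int) - 55)
  else none

def fromHex? : List Char → Option (List Int)
  | [] => some []
  | c :: rest =>
    if c = ' ' ∨ c = '\t' ∨ c = '\n' ∨ c = '\r' then fromHex? rest
    else match hexVal c, rest with
      | some h, d :: rest' =>
        match hexVal d with
        | some l => (fromHex? rest').map (fun t => (16 * h + l) :: t)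
        | none => none
      | _, _ => none

-- ===== PORT A =====
def find_consistent_positions (responses : List String) : List Int :=
  let byte_responses := responses.map (fun r => (fromHex? r.toList).getD [])
  let min_length := ((byte_responses.map List.length).min?).getD 0
  (List.range min_length).foldl
    (fun (acc : List Int) (i : Nat) =>
      let values := PySem.Set.ofList (byte_responses.map (fun r => r.getD i 0))
      if values.length = 1 then acc ++ [(i : Int)] else acc) []

-- ===== PORT B =====
def find_consistent_positions_alt (responses : List String) : List Int :=
  let byte_responses := responses.map (fun r => (fromHex? r.toList).getD [])
  let min_length := ((byte_responses.map List.length).min?).getD 0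
  match byte_responses with
  | [] => []
  | ref :: rest =>
    rest.foldl
      (fun cand r => cand.filter (fun i => r.getD i.toNat 0 == ref.getD i.toNat 0))
      ((List.range min_length).map (fun (i : Nat) => (i : Int)))

-- ===== PRECONDITION & SPEC =====
def isHexChar (c : Char) : Bool :=
  ('0' ≤ c && c ≤ '9') || ('a' ≤ c && c ≤ 'f') || ('A' ≤ c && c ≤ 'F')

-- Pre_ excludes exactly the inputs where the Python A raises ValueError: the empty
-- list (min of an empty sequence) and any string bytes.fromhex rejects — a string is
-- accepted iff each whitespace-separated word is an even-length run of hex digits.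
def Pre_find_consistent_positions (responses : List String) : Prop :=
  responses ≠ [] ∧
  responses.all
    (fun s => (PySem.Str.split₀ s).all
      (fun w => w.toList.length % 2 == 0 && w.toList.all isHexChar)) = true
instance (responses : List String) : Decidable (Pre_find_consistent_positions responses) := by
  unfold Pre_find_consistent_positions; infer_instance

def pvWitness_find_consistent_positions : List String := ["00ff", "0a ff", "00"]

def Spec_find_consistent_positions (responses : List String) (out : List Int) : Prop := out = find_consistent_positions_alt responses
instance (responses : List String) (out : List Int) : Decidable (Spec_find_consistent_positions responses out) := by unfold Spec_find_consistent_positions; infer_instance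

-- ===== CLAIM (what is proved, stated in full; the proofs are below) =====
def Claim_equal_find_consistent_positions : Prop := ∀ (responses : List String), Dom_find_consistent_positions responses → Pre_find_consistent_positions responses → Spec_find_consistent_positions responses (find_consistent_positions responses)

-- ===== LEMMAS AND PROOFS =====

-- iterated filtering = one filter by the conjunction of all tests
theorem foldl_filter_eq_filter_all {α β : Type} (q : β → α → Bool) :
    ∀ (rs : List β) (init : List α),
      rs.foldl (fun c r => c.filter (q r)) init
        = init.filter (fun x => rs.all (fun r => q r x)) := by
  intro rs
  induction rs with
  | nil => intro init; simp
  | cons r rs ih =>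
    intro init
    simp only [List.foldl_cons, ih, List.filter_filter, List.all_cons]
    apply List.filter_congr
    intro x _
    simp [Bool.and_comm]

-- a nodup list whose elements all equal x has at most one element
theorem nodup_all_eq_length_le_one (x : Int) :
    ∀ (l : List Int), l.Nodup → (∀ y ∈ l, y = x) → l.length ≤ 1 := by
  intro l hnd hall
  match l, hnd, hall with
  | [], _, _ => simp
  | [a], _, _ => simp
  | a :: b :: t, hnd, hall =>
    exfalso
    have ha := hall a (by simp)
    have hb := hall b (by simp)
    rw [ha, hb] at hnd
    simp at hnd

-- a Python set built from x :: xs has exactly one element iff every element equals x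
theorem ofList_length_one_iff (x : Int) (xs : List Int) :
    (PySem.Set.ofList (x :: xs)).length = 1 ↔ ∀ y ∈ xs, y = x := by
  have hx : x ∈ PySem.Set.ofList (x :: xs) := by
    rw [PySem.Set.mem_ofList]; exact List.mem_cons_self ..
  constructor
  · intro h y hy
    obtain ⟨a, ha⟩ := List.length_eq_one_iff.mp h
    have hyq : y ∈ PySem.Set.ofList (x :: xs) := by
      rw [PySem.Set.mem_ofList]; exact List.mem_cons_of_mem _ hy
    rw [ha] at hx hyq
    simp only [List.mem_singleton] at hx hyq
    rw [hyq, hx]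
  · intro h
    have hsub : ∀ y ∈ PySem.Set.ofList (x :: xs), y = x := by
      intro y hy
      rw [PySem.Set.mem_ofList] at hy
      rcases List.mem_cons.mp hy with hy | hy
      · exact hy
      · exact h y hy
    have hle := nodup_all_eq_length_le_one x _ (PySem.Set.nodup_ofList _) hsub
    have hpos : 0 < (PySem.Set.ofList (x :: xs)).length := List.length_pos_of_mem hx
    omega

theorem filter_map_cast (q : Int → Bool) :
    ∀ (l : List Nat),
      (l.map (fun (i : Nat) => (i : Int))).filter q
        = (l.filter (fun (i : Nat) => q (i : Int))).map (fun (i : Nat) => (i : Int)) := by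
  intro l
  induction l with
  | nil => rfl
  | cons a t ih =>
    simp only [List.map_cons, List.filter_cons]
    by_cases hq : q (a : Int) = true
    · simp only [hq, if_true, List.map_cons, ih]
    · simp only [Bool.not_eq_true] at hq
      simp only [hq, Bool.false_eq_true, if_false, ih]

-- ===== VERDICT (by name: the statement is the Claim_ definition above) =====
theorem find_consistent_positions_spec : Claim_equal_find_consistent_positions := by
  intro responses _ _
  unfold Spec_find_consistent_positions find_consistent_positions find_consistent_positions_alt
  cases hbr : responses.map (fun r => (fromHex? r.toList).getD []) with
  | nil => simp
  | cons b0 bs =>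
    dsimp only
    rw [PySem.List.foldl_append_ite
      (p := fun i => (PySem.Set.ofList ((b0 :: bs).map (fun r => r.getD i 0))).length = 1)
      (f := fun i => (i : Int))]
    rw [foldl_filter_eq_filter_all]
    rw [filter_map_cast]
    simp only [List.nil_append]
    refine congrArg (List.map _) (List.filter_congr ?_)
    intro i _
    have : (∀ y ∈ bs.map (fun r => r.getD i 0), y = b0.getD i 0)
        ↔ (bs.all (fun r => r.getD i 0 == b0.getD i 0) = true) := by
      simp
    simp only [Int.toNat_natCast, List.map_cons]
    by_cases hb : (bs.all fun r => r.getD i 0 == b0.getD i 0) = true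
    · rw [hb, decide_eq_true_iff, ofList_length_one_iff]
      exact this.mpr hb
    · rw [Bool.not_eq_true] at hb
      rw [hb, decide_eq_false_iff_not, ofList_length_one_iff]
      intro hc
      rw [this] at hc
      rw [hc] at hb
      exact Bool.noConfusion hb
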